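-- pv_equiv track=rewrite | github.com/adr20020817/Red-Traffic-Light-Violation | process_license_images.py | combine_tanzania_license_plate_lines
-- ===== SOURCE A (Python) =====
-- def combine_tanzania_license_plate_lines(text_lines):
--     """
--     Combine multiple text lines into a proper Tanzania license plate format
--
--     Args:
--         text_lines: List of cleaned text lines from top to bottom
--
--     Returns:
--         Combined license plate text
--     """
--     if not text_lines:
--         return None
--
--     # Filter out very short or invalid lines
--     valid_lines = [line for line in text_lines if line and len(line) >= 1]
--
--     if not valid_lines:
--         return None
--
--     # For Tanzania plates, typically combine with a space or dash
--     # You can modify this based on your specific format requirements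
--     if len(valid_lines) == 1:
--         return valid_lines[0]
--     elif len(valid_lines) == 2:
--         # Two lines: combine them (e.g., "ABC" + "123" = "ABC 123")
--         return f"{valid_lines[0]} {valid_lines[1]}"
--     else:
--         # More than two lines: take the two longest ones
--         valid_lines.sort(key=len, reverse=True)
--         return f"{valid_lines[0]} {valid_lines[1]}"
-- ===== SOURCE B (Python) =====
-- def combine_tanzania_license_plate_lines(text_lines):
--     """Combine text lines into a Tanzania license plate string.
--
--     One-pass top-two selection instead of sorting in the >2 branch.
--     """
--     if not text_lines:
--         return None
--
--     valid = [line for line in text_lines if line]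
--
--     if not valid:
--         return None
--
--     if len(valid) == 1:
--         return valid[0]
--     if len(valid) == 2:
--         return f"{valid[0]} {valid[1]}"
--
--     # More than two lines: track the two longest in a single pass.
--     # Strict '>' comparisons keep the earliest line on length ties,
--     # matching a stable descending sort by length.
--     best, second = valid[0], None
--     for line in valid[1:]:
--         if len(line) > len(best):
--             best, second = line, best
--         elif second is None or len(line) > len(second):
--             second = line
--     return f"{best} {second}"
-- ===== Notes on version B (the rewrite author's own statement) =====
-- stated objective: alternative
-- what changed: In the more-than-two-lines branch, B replaces the stable descending sort by length with a single-pass top-two selection (strict comparisons keep the earliest line on ties, matching the stable sort); the guard clauses and the 1/2-line branches are unchanged.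
import Mathlib
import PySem

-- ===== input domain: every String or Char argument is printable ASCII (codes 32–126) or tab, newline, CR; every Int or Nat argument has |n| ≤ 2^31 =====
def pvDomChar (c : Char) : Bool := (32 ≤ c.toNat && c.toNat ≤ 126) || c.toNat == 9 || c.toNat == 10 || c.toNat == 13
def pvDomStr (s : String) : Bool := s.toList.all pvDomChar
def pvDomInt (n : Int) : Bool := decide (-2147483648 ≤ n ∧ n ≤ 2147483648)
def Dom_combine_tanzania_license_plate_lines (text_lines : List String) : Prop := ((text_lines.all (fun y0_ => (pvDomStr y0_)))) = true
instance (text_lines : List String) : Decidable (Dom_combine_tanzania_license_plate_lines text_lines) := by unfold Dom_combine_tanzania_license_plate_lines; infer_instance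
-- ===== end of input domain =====

-- B replaces the sort in the >2-lines branch by a single-pass top-two selection (alternative algorithm, same result).

-- ===== PORT A =====
def combine_tanzania_license_plate_lines (text_lines : List String) : Option String :=
  if text_lines = [] then none
  else
    -- valid_lines = [line for line in text_lines if line and len(line) >= 1]
    let valid := text_lines.filter (fun line => !line.toList.isEmpty && decide (1 ≤ PySem.Str.len line))
    if valid = [] then none
    else if valid.length = 1 then some (valid.getD 0 "")
    else if valid.length = 2 then some (valid.getD 0 "" ++ " " ++ valid.getD 1 "")
    else
      -- valid_lines.sort(key=len, reverse=True)
      let sorted_lines := PySem.List.sorted valid PySem.Str.len true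
      some (sorted_lines.getD 0 "" ++ " " ++ sorted_lines.getD 1 "")

-- ===== PORT B =====
-- one loop step: keeps the two longest lines seen so far (earliest wins on ties)
def pvTopTwoStep (s : String × Option String) (line : String) : String × Option String :=
  if PySem.Str.len s.1 < PySem.Str.len line then (line, some s.1)
  else
    match s.2 with
    | none => (s.1, some line)
    | some sec => if PySem.Str.len sec < PySem.Str.len line then (s.1, some line) else s

def combine_tanzania_license_plate_lines_alt (text_lines : List String) : Option String :=
  if text_lines = [] then none
  else
    let valid := text_lines.filter (fun line => !line.toList.isEmpty)
    if valid = [] then none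
    else if valid.length = 1 then some (valid.getD 0 "")
    else if valid.length = 2 then some (valid.getD 0 "" ++ " " ++ valid.getD 1 "")
    else
      -- best, second = valid[0], None; loop over valid[1:]
      let st := (PySem.List.slice valid (some 1) none).foldl pvTopTwoStep
                  (PySem.List.pyGetD valid 0 "", none)
      some (st.1 ++ " " ++ st.2.getD "")

-- ===== PRECONDITION & SPEC =====
def Spec_combine_tanzania_license_plate_lines (text_lines : List String) (out : Option String) : Prop := out = combine_tanzania_license_plate_lines_alt text_lines
instance (text_lines : List String) (out : Option String) : Decidable (Spec_combine_tanzania_license_plate_lines text_lines out) := by unfold Spec_combine_tanzania_license_plate_lines; infer_instance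

-- ===== CLAIM (what is proved, stated in full; the proofs are below) =====
def Claim_equal_combine_tanzania_license_plate_lines : Prop := ∀ (text_lines : List String), Dom_combine_tanzania_license_plate_lines text_lines → Spec_combine_tanzania_license_plate_lines text_lines (combine_tanzania_license_plate_lines text_lines)

-- ===== LEMMAS AND PROOFS =====

-- the two filter predicates agree: a string is truthy iff its length is ≥ 1
theorem pv_filter_eq (tl : List String) :
    tl.filter (fun line => !line.toList.isEmpty && decide (1 ≤ PySem.Str.len line)) =
    tl.filter (fun line => !line.toList.isEmpty) := by
  apply List.filter_congr
  intro line _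
  cases h : line.toList <;> simp [PySem.Str.len_eq, h]

-- invariant: the first two slots of the insertion-sorted (desc, stable) list
-- are exactly the state of the top-two fold
theorem pv_topTwo_inv (rest : List String) : ∀ (acc : List String) (s : String × Option String),
    acc.head? = some s.1 → acc[1]? = s.2 →
    (rest.foldl (fun acc x => PySem.List.insertBy (fun a b => decide (PySem.Str.len b < PySem.Str.len a)) x acc) acc).head?
      = some (rest.foldl pvTopTwoStep s).1 ∧
    (rest.foldl (fun acc x => PySem.List.insertBy (fun a b => decide (PySem.Str.len b < PySem.Str.len a)) x acc) acc)[1]?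
      = (rest.foldl pvTopTwoStep s).2 := by
  induction rest with
  | nil => intro acc s h1 h2; simp only [List.foldl_nil]; exact ⟨h1, h2⟩
  | cons x xs ih =>
    intro acc s h1 h2
    obtain ⟨b1, b2⟩ := s
    simp only [List.foldl_cons]
    cases acc with
    | nil => simp at h1
    | cons a t =>
      have ha : a = b1 := by simpa using h1
      subst ha
      cases t with
      | nil =>
        have hs2 : b2 = none := by simpa using h2.symm
        subst hs2
        by_cases hc : a.length < x.length
        · exact ih _ _ (by simp [PySem.List.insertBy, pvTopTwoStep, PySem.Str.len_eq, hc])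
                       (by simp [PySem.List.insertBy, pvTopTwoStep, PySem.Str.len_eq, hc])
        · exact ih _ _ (by simp [PySem.List.insertBy, pvTopTwoStep, PySem.Str.len_eq, hc])
                       (by simp [PySem.List.insertBy, pvTopTwoStep, PySem.Str.len_eq, hc])
      | cons b t' =>
        have hs2 : b2 = some b := by simpa using h2.symm
        subst hs2
        by_cases hc : a.length < x.length
        · exact ih _ _ (by simp [PySem.List.insertBy, pvTopTwoStep, PySem.Str.len_eq, hc])
                       (by simp [PySem.List.insertBy, pvTopTwoStep, PySem.Str.len_eq, hc])
        · by_cases hc2 : b.length < x.length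
          · exact ih _ _ (by simp [PySem.List.insertBy, pvTopTwoStep, PySem.Str.len_eq, hc, hc2])
                         (by simp [PySem.List.insertBy, pvTopTwoStep, PySem.Str.len_eq, hc, hc2])
          · exact ih _ _ (by simp [PySem.List.insertBy, pvTopTwoStep, PySem.Str.len_eq, hc, hc2])
                         (by simp [PySem.List.insertBy, pvTopTwoStep, PySem.Str.len_eq, hc, hc2])

-- the >2 branch: head and second element of the stable descending sort
-- equal the result of the one-pass top-two fold
theorem pv_sorted_vs_fold (v0 : String) (rest : List String) :
    (PySem.List.sorted (v0 :: rest) PySem.Str.len true).getD 0 ""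
        = ((rest.foldl pvTopTwoStep (v0, none)).1) ∧
    (PySem.List.sorted (v0 :: rest) PySem.Str.len true).getD 1 ""
        = ((rest.foldl pvTopTwoStep (v0, none)).2).getD "" := by
  have hfold := PySem.List.sorted_rev_eq_foldl_insertBy (v0 :: rest) PySem.Str.len
  have hbase : (List.foldl (fun acc x => PySem.List.insertBy (fun a b => decide (PySem.Str.len b < PySem.Str.len a)) x acc) [] (v0 :: rest))
      = (List.foldl (fun acc x => PySem.List.insertBy (fun a b => decide (PySem.Str.len b < PySem.Str.len a)) x acc) [v0] rest) := by
    simp [PySem.List.insertBy]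
  have hinv := pv_topTwo_inv rest [v0] (v0, none) (by simp) (by simp)
  rw [hfold, hbase]
  constructor
  · rw [List.getD_eq_getElem?_getD, ← List.head?_eq_getElem?, hinv.1]; rfl
  · rw [List.getD_eq_getElem?_getD, hinv.2]

theorem pv_main (tl : List String) :
    combine_tanzania_license_plate_lines tl = combine_tanzania_license_plate_lines_alt tl := by
  unfold combine_tanzania_license_plate_lines combine_tanzania_license_plate_lines_alt
  simp only [pv_filter_eq tl]
  split_ifs with h0 h1 h2 h3
  · rfl
  · rfl
  · rfl
  · rfl
  · cases hv : tl.filter (fun line => !line.toList.isEmpty) with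
    | nil => exact absurd hv h1
    | cons v0 rest =>
      have := pv_sorted_vs_fold v0 rest
      simp only [PySem.List.pyGetD_zero_cons, PySem.List.slice_from_one, List.tail_cons,
        this.1, this.2]

-- ===== VERDICT (by name: the statement is the Claim_ definition above) =====
theorem combine_tanzania_license_plate_lines_spec : Claim_equal_combine_tanzania_license_plate_lines := by
  intro tl _
  exact pv_main tl
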